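-- pv_equiv track=rewrite | github.com/TragicMayhem/advent_of_code | aoc_2024/aoc2024d01.py | part2
-- ===== SOURCE A (Python) =====
-- from typing import Callable, List, Union
-- from collections import Counter
--
-- def part2(data: List[tuple]):
--     """Solve part 2 - Calculates the sum of similarities (l * count of r)"""
--
--     left_list = []
--     right_list = []
--     for l, r in data:
--         left_list.append(l)
--         right_list.append(r)
--
--     right_counter = Counter(right_list)
--     tot_sim = 0
--
--     for l in left_list:
--         if l in right_counter:
--             tot_sim += l * right_counter[l]
--
--     return tot_sim
-- ===== SOURCE B (Python) =====
-- def part2(data):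
--     """Sort both columns, then one merge-style two-pointer scan over runs of
--     equal values: for each run of v in the left column, advance the right
--     pointer past smaller values and count the run of v there."""
--     left = sorted(l for l, _ in data)
--     right = sorted(r for _, r in data)
--     n, m = len(left), len(right)
--     tot = 0
--     i = j = 0
--     while i < n:
--         v = left[i]
--         lc = 0
--         while i < n and left[i] == v:
--             i += 1
--             lc += 1
--         while j < m and right[j] < v:
--             j += 1
--         rc = 0
--         while j < m and right[j] == v:
--             j += 1
--             rc += 1
--         tot += v * lc * rc
--     return tot
-- ===== Notes on version B (the rewrite author's own statement) =====
-- stated objective: alternative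
-- what changed: Replaces the Counter hash table and per-element loop with sorting both columns and a single merge-style two-pointer scan over runs of equal values (v * left-run * right-run), using no dictionary at all.
import Mathlib
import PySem

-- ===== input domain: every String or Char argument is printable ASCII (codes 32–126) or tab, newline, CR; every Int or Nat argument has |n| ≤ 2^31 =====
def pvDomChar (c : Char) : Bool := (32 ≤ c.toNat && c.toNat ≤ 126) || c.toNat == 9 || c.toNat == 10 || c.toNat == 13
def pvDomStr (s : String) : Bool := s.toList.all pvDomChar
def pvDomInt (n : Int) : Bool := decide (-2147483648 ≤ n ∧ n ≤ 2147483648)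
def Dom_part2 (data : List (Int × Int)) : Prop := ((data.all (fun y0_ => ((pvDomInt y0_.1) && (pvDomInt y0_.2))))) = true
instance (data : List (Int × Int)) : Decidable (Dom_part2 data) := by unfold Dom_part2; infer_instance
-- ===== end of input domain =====

-- B replaces the Counter hash table and per-element loop with sorting both columns and one
-- merge-style two-pointer scan over runs of equal values; same return value, no dictionary.

-- ===== PORT A =====
def part2 (data : List (Int × Int)) : Int :=
  let left_list := data.foldl (fun acc p => acc ++ [p.1]) []
  let right_list := data.foldl (fun acc p => acc ++ [p.2]) []
  let right_counter := PySem.Dict.counter right_list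
  left_list.foldl
    (fun tot_sim l =>
      if right_counter.contains l then tot_sim + l * right_counter.getD l 0 else tot_sim) 0

-- ===== PORT B =====
-- `while i < n and xs[i] == v: i += 1` — returns the final i
def advEq (xs : List Int) (v : Int) (i : Nat) : Nat :=
  if h : i < xs.length then
    if xs[i] = v then advEq xs v (i + 1) else i
  else i
termination_by xs.length - i

-- `while j < m and xs[j] < v: j += 1` — returns the final j
def advLt (xs : List Int) (v : Int) (j : Nat) : Nat :=
  if h : j < xs.length then
    if xs[j] < v then advLt xs v (j + 1) else j
  else j
termination_by xs.length - j

-- termination of the outer `while i < n` loop: the run-skipping step advances i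
theorem advEq_ge (xs : List Int) (v : Int) (i : Nat) : i ≤ advEq xs v i := by
  rw [advEq]
  split_ifs with h1 h2
  · have := advEq_ge xs v (i + 1); omega
  · exact le_refl i
  · exact le_refl i
termination_by xs.length - i

theorem advEq_gt (xs : List Int) (v : Int) (i : Nat) (h : i < xs.length) (hv : xs[i] = v) :
    i < advEq xs v i := by
  rw [advEq, dif_pos h, if_pos hv]
  have := advEq_ge xs v (i + 1); omega

-- the outer `while i < n` loop of B
def bLoop (left right : List Int) (i j : Nat) (tot : Int) : Int :=
  if h : i < left.length then
    let v := left[i]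
    let i' := advEq left v i
    let lc := i' - i
    let j1 := advLt right v j
    let j' := advEq right v j1
    let rc := j' - j1
    bLoop left right i' j' (tot + v * (lc : Int) * (rc : Int))
  else tot
termination_by left.length - i
decreasing_by
  have := advEq_gt left left[i] i h rfl
  omega

def part2_alt (data : List (Int × Int)) : Int :=
  let left := PySem.List.sorted (data.map (fun p => p.1)) (fun x => x) false
  let right := PySem.List.sorted (data.map (fun p => p.2)) (fun x => x) false
  bLoop left right 0 0 0

-- ===== PRECONDITION & SPEC =====
def Spec_part2 (data : List (Int × Int)) (out : Int) : Prop := out = part2_alt data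
instance (data : List (Int × Int)) (out : Int) : Decidable (Spec_part2 data out) := by unfold Spec_part2; infer_instance

-- ===== CLAIM (what is proved, stated in full; the proofs are below) =====
def Claim_equal_part2 : Prop := ∀ (data : List (Int × Int)), Dom_part2 data → Spec_part2 data (part2 data)

-- ===== LEMMAS AND PROOFS =====

-- the common value of both programs: Σ_{l ∈ A} l * (count of l in B)
def simS (A B : List Int) : Int := (A.map (fun l => l * (B.count l : Int))).sum

-- A's guarded accumulation step equals the unguarded one: a missing key has count 0.
lemma part2_step_eq (R : List Int) :
    (fun (tot : Int) (l : Int) =>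
        if (PySem.Dict.counter R).contains l then tot + l * (PySem.Dict.counter R).getD l 0 else tot)
      = fun tot l => tot + l * (R.count l : Int) := by
  funext tot l
  by_cases h : l ∈ R
  · simp [PySem.Dict.contains_counter, PySem.Dict.getD_counter, h]
  · simp [PySem.Dict.contains_counter, h, List.count_eq_zero_of_not_mem h]

lemma part2_eq_simS (data : List (Int × Int)) :
    part2 data = simS (data.map (fun p => p.1)) (data.map (fun p => p.2)) := by
  unfold part2
  simp only [PySem.List.foldl_append_singleton_eq_map, List.nil_append]
  rw [part2_step_eq, PySem.List.foldl_add, zero_add]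
  rfl

-- dropping a prefix of non-`a` elements keeps the count of `a`
lemma count_dropWhile_eq (xs : List Int) (p : Int → Bool) (a : Int)
    (h : ∀ x, p x = true → x ≠ a) : (xs.dropWhile p).count a = xs.count a := by
  nth_rewrite 2 [← List.takeWhile_append_dropWhile (p := p) (l := xs)]
  rw [List.count_append]
  have h0 : (xs.takeWhile p).count a = 0 :=
    List.count_eq_zero.mpr (fun hm => (h a (List.mem_takeWhile_imp hm)) rfl)
  omega

-- dropping the length of the takeWhile-prefix IS dropWhile
lemma drop_len_takeWhile (xs : List Int) (p : Int → Bool) :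
    xs.drop (xs.takeWhile p).length = xs.dropWhile p := by
  nth_rewrite 2 [← List.takeWhile_append_dropWhile (p := p) (l := xs)]
  exact List.drop_left

-- in a sorted list whose elements are all ≥ v, the v's form exactly the takeWhile-prefix
lemma count_sorted_ge (C : List Int) (v : Int) (hs : C.Pairwise (· ≤ ·))
    (hge : ∀ x ∈ C, v ≤ x) : (C.count v) = (C.takeWhile (fun x => x == v)).length := by
  induction C with
  | nil => simp
  | cons c C' ih =>
    rw [List.pairwise_cons] at hs
    by_cases hc : c = v
    · subst hc
      simp only [List.count_cons, List.takeWhile_cons, BEq.rfl, if_true, List.length_cons]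
      have := ih hs.2 (fun x hx => hge x (List.mem_cons_of_mem _ hx))
      simp [this]
    · have hvc : v < c := lt_of_le_of_ne (hge c (List.mem_cons_self)) (fun e => hc e.symm)
      have h0 : C'.count v = 0 :=
        List.count_eq_zero.mpr (fun hm => absurd (hs.1 v hm) (not_le.mpr hvc))
      simp [hc, h0]

-- after skipping the run of v's in a sorted all-≥-v list, everything is > v
lemma gt_dropWhile_eq (C : List Int) (v : Int) (hs : C.Pairwise (· ≤ ·))
    (hge : ∀ x ∈ C, v ≤ x) : ∀ x ∈ C.dropWhile (fun x => x == v), v < x := by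
  induction C with
  | nil => simp
  | cons c C' ih =>
    rw [List.pairwise_cons] at hs
    by_cases hc : c = v
    · subst hc
      rw [List.dropWhile_cons]
      simp only [BEq.rfl, if_true]
      exact ih hs.2 (fun x hx => hge x (List.mem_cons_of_mem _ hx))
    · have hvc : v < c := lt_of_le_of_ne (hge c (List.mem_cons_self)) (fun e => hc e.symm)
      rw [List.dropWhile_cons]
      simp only [beq_iff_eq, hc, if_false]
      intro x hx
      rcases List.mem_cons.mp hx with rfl | hx'
      · exact hvc
      · exact lt_of_lt_of_le hvc (hs.1 x hx')

-- after skipping the elements < v in a sorted list, everything is ≥ v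
lemma ge_dropWhile_lt (C : List Int) (v : Int) (hs : C.Pairwise (· ≤ ·)) :
    ∀ x ∈ C.dropWhile (fun x => decide (x < v)), v ≤ x := by
  induction C with
  | nil => simp
  | cons c C' ih =>
    rw [List.pairwise_cons] at hs
    by_cases hc : c < v
    · rw [List.dropWhile_cons]
      simp only [hc, decide_true, if_true]
      exact ih hs.2
    · rw [List.dropWhile_cons]
      simp only [hc, decide_false]
      intro x hx
      rcases List.mem_cons.mp hx with rfl | hx'
      · exact le_of_not_gt hc
      · exact le_trans (le_of_not_gt hc) (hs.1 x hx')

-- a run of v's contributes v * (run length) * c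
lemma sum_run (T : List Int) (v c : Int) (hT : ∀ x ∈ T, x = v) :
    (T.map (fun l => l * c)).sum = (T.length : Int) * (v * c) := by
  induction T with
  | nil => simp
  | cons t T' ih =>
    have ht : t = v := hT t List.mem_cons_self
    have := ih (fun x hx => hT x (List.mem_cons_of_mem _ hx))
    simp only [List.map_cons, List.sum_cons, List.length_cons, this, ht]
    push_cast
    ring

lemma simS_congr_right (A B B' : List Int) (h : ∀ l ∈ A, B.count l = B'.count l) :
    simS A B = simS A B' := by
  unfold simS
  congr 1
  exact List.map_congr_left (fun l hl => by rw [h l hl])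

lemma advEq_spec (xs : List Int) (v : Int) (i : Nat) :
    advEq xs v i = i + ((xs.drop i).takeWhile (fun x => x == v)).length := by
  rw [advEq]
  split_ifs with h1 h2
  · rw [advEq_spec xs v (i + 1), List.drop_eq_getElem_cons h1]
    simp only [List.takeWhile_cons, beq_iff_eq, h2, if_true, List.length_cons]
    omega
  · rw [List.drop_eq_getElem_cons h1]
    simp [h2]
  · rw [List.drop_eq_nil_of_le (by omega)]
    simp
termination_by xs.length - i

lemma advLt_spec (xs : List Int) (v : Int) (j : Nat) :
    advLt xs v j = j + ((xs.drop j).takeWhile (fun x => decide (x < v))).length := by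
  rw [advLt]
  split_ifs with h1 h2
  · rw [advLt_spec xs v (j + 1), List.drop_eq_getElem_cons h1]
    simp only [List.takeWhile_cons, h2, decide_true, if_true, List.length_cons]
    omega
  · rw [List.drop_eq_getElem_cons h1]
    simp [h2]
  · rw [List.drop_eq_nil_of_le (by omega)]
    simp
termination_by xs.length - j

-- the merge scan computes simS of the remaining suffixes
lemma bLoop_spec (left right : List Int) (i j : Nat) (tot : Int)
    (hl : (left.drop i).Pairwise (· ≤ ·)) (hr : (right.drop j).Pairwise (· ≤ ·)) :
    bLoop left right i j tot = tot + simS (left.drop i) (right.drop j) := by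
  rw [bLoop]
  split_ifs with h
  · set v := left[i] with hv
    set L := left.drop i with hLdef
    set R := right.drop j with hRdef
    have hdL : L = v :: left.drop (i + 1) := List.drop_eq_getElem_cons h
    -- all of L is ≥ v
    have hgeL : ∀ x ∈ L, v ≤ x := by
      rw [hdL] at hl ⊢
      rw [List.pairwise_cons] at hl
      intro x hx
      rcases List.mem_cons.mp hx with rfl | hx'
      · exact le_refl _
      · exact hl.1 x hx'
    -- pointer arithmetic → takeWhile/dropWhile decompositions
    have hi' : advEq left v i = i + (L.takeWhile (fun x => x == v)).length := advEq_spec ..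
    have hdropL : left.drop (advEq left v i) = L.dropWhile (fun x => x == v) := by
      rw [hi', ← List.drop_drop, ← hLdef, drop_len_takeWhile]
    have hj1 : advLt right v j = j + (R.takeWhile (fun x => decide (x < v))).length := advLt_spec ..
    set R1 := R.dropWhile (fun x => decide (x < v)) with hR1def
    have hdropR1 : right.drop (advLt right v j) = R1 := by
      rw [hj1, ← List.drop_drop, ← hRdef, drop_len_takeWhile]
    have hj' : advEq right v (advLt right v j)
        = advLt right v j + (R1.takeWhile (fun x => x == v)).length := by
      rw [advEq_spec, hdropR1]
    have hdropR' : right.drop (advEq right v (advLt right v j))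
        = R1.dropWhile (fun x => x == v) := by
      rw [hj', ← List.drop_drop, hdropR1, drop_len_takeWhile]
    -- sortedness of the suffixes
    have hl' : (left.drop (advEq left v i)).Pairwise (· ≤ ·) := by
      rw [hdropL]; exact hl.sublist (List.dropWhile_sublist _)
    have hr1 : R1.Pairwise (· ≤ ·) := hr.sublist (List.dropWhile_sublist _)
    have hr' : (right.drop (advEq right v (advLt right v j))).Pairwise (· ≤ ·) := by
      rw [hdropR']; exact hr1.sublist (List.dropWhile_sublist _)
    rw [bLoop_spec left right _ _ _ hl' hr']
    -- counts of v: skipped < v elements don't matter, then the run is the count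
    have hgeR1 : ∀ x ∈ R1, v ≤ x := ge_dropWhile_lt R v hr
    have hcntv : (R.count v : Int) = ((R1.takeWhile (fun x => x == v)).length : Int) := by
      have e1 : R1.count v = R.count v :=
        count_dropWhile_eq R _ v (fun x hx => ne_of_lt (of_decide_eq_true hx))
      have e2 : R1.count v = (R1.takeWhile (fun x => x == v)).length :=
        count_sorted_ge R1 v hr1 hgeR1
      omega
    -- split L into its v-run and the rest
    have hsplit : L = L.takeWhile (fun x => x == v) ++ L.dropWhile (fun x => x == v) :=
      (List.takeWhile_append_dropWhile).symm
    have hTv : ∀ x ∈ L.takeWhile (fun x => x == v), x = v :=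
      fun x hx => by simpa using List.mem_takeWhile_imp hx
    -- counts of the remaining (> v) left elements are unchanged in R'
    have hrest : ∀ l ∈ L.dropWhile (fun x => x == v),
        R.count l = (R1.dropWhile (fun x => x == v)).count l := by
      intro l hlmem
      have hvl : v < l := gt_dropWhile_eq L v hl hgeL l hlmem
      have e1 : R1.count l = R.count l :=
        count_dropWhile_eq R _ l (fun x hx => ne_of_lt (lt_trans (of_decide_eq_true hx) hvl))
      have e2 : (R1.dropWhile (fun x => x == v)).count l = R1.count l :=
        count_dropWhile_eq R1 _ l
          (fun x hx => by
            have hx' : x = v := by simpa using hx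
            omega)
      omega
    have hrun : simS (L.takeWhile (fun x => x == v)) R
        = ((L.takeWhile (fun x => x == v)).length : Int)
            * (v * ((R1.takeWhile (fun x => x == v)).length : Int)) := by
      unfold simS
      rw [List.map_congr_left (g := fun l => l * (R.count v : Int))
        (fun x hx => by rw [hTv x hx])]
      rw [sum_run _ v _ hTv, hcntv]
    have hSrest : simS (L.dropWhile (fun x => x == v)) R
        = simS (L.dropWhile (fun x => x == v)) (R1.dropWhile (fun x => x == v)) :=
      simS_congr_right _ _ _ hrest
    -- assemble
    have hS : simS L R
        = v * ((L.takeWhile (fun x => x == v)).length : Int)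
            * ((R1.takeWhile (fun x => x == v)).length : Int)
          + simS (L.dropWhile (fun x => x == v)) (R1.dropWhile (fun x => x == v)) := by
      have h1 : simS L R = simS (L.takeWhile (fun x => x == v)) R
          + simS (L.dropWhile (fun x => x == v)) R := by
        conv_lhs => rw [hsplit]
        unfold simS
        rw [List.map_append, List.sum_append]
      rw [h1, hrun, hSrest]
      ring
    rw [hdropL, hdropR']
    have hlc : ((advEq left v i - i : Nat) : Int) = ((L.takeWhile (fun x => x == v)).length : Int) := by
      omega
    have hrc : ((advEq right v (advLt right v j) - advLt right v j : Nat) : Int)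
        = ((R1.takeWhile (fun x => x == v)).length : Int) := by
      omega
    rw [hlc, hrc, hS]
    ring
  · rw [List.drop_eq_nil_of_le (by omega)]
    simp [simS]
termination_by left.length - i
decreasing_by
  have := advEq_gt left left[i] i h rfl
  omega

lemma part2_alt_eq_simS (data : List (Int × Int)) :
    part2_alt data = simS (data.map (fun p => p.1)) (data.map (fun p => p.2)) := by
  unfold part2_alt
  set L0 := data.map (fun p => p.1)
  set R0 := data.map (fun p => p.2)
  set sL := PySem.List.sorted L0 (fun x => x) false with hsL
  set sR := PySem.List.sorted R0 (fun x => x) false with hsR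
  have hpl : (sL.drop 0).Pairwise (· ≤ ·) := by
    simpa using PySem.List.sorted_pairwise L0 (fun x => x)
  have hpr : (sR.drop 0).Pairwise (· ≤ ·) := by
    simpa using PySem.List.sorted_pairwise R0 (fun x => x)
  rw [bLoop_spec sL sR 0 0 0 hpl hpr, zero_add, List.drop_zero, List.drop_zero]
  have hpermL : sL.Perm L0 := PySem.List.sorted_perm ..
  have hpermR : sR.Perm R0 := PySem.List.sorted_perm ..
  calc simS sL sR = simS sL R0 :=
        simS_congr_right _ _ _ (fun l _ => hpermR.count_eq l)
    _ = simS L0 R0 := (hpermL.map (fun l => l * ((R0.count l : Nat) : Int))).sum_eq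

-- ===== VERDICT (by name: the statement is the Claim_ definition above) =====
theorem part2_spec : Claim_equal_part2 := by
  intro data _
  unfold Spec_part2
  rw [part2_eq_simS, part2_alt_eq_simS]
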